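-- pv_equiv track=rewrite | github.com/CdeBeer7th/SeqPredNN | prediction.py | check_labels
-- ===== SOURCE A (Python) =====
-- def check_labels(true_residues):
--     unused_residues = []
--     labels = []
--     for key in range(0, 20):
--         if key not in true_residues:
--             unused_residues.append(key)
--         else:
--             labels.append(key)
--     return unused_residues, labels
-- ===== SOURCE B (Python) =====
-- def check_labels(true_residues):
--     full = set(range(20))
--     present = set(true_residues)
--     labels = sorted(full & present)
--     unused_residues = sorted(full - present)
--     return unused_residues, labels
-- ===== Notes on version B (the rewrite author's own statement) =====
-- stated objective: simpler
-- what changed: Replaces the 20-iteration membership loop with two appended accumulators by building set(range(20)) and set(true_residues) once and returning the sorted set difference and intersection.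
import Mathlib
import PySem

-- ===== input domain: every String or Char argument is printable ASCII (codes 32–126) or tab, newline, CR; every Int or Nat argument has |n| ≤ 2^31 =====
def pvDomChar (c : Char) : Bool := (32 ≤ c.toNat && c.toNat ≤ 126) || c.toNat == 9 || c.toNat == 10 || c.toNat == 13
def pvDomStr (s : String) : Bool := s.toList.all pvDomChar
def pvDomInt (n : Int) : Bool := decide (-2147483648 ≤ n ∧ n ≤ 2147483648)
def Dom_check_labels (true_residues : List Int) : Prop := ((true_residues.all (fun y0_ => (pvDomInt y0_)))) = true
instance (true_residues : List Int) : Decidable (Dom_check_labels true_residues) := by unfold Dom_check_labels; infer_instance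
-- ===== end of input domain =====

-- B replaces A's 20-step membership loop by set difference/intersection with sorted output (simpler; same results).

-- ===== PORT A =====
-- for key in range(0, 20): if key not in true_residues: unused.append(key) else: labels.append(key)
def check_labels (true_residues : List Int) : List Int × List Int :=
  (PySem.List.pyRange 0 20 1).foldl
    (fun st key =>
      if key ∉ true_residues then (st.1 ++ [key], st.2) else (st.1, st.2 ++ [key]))
    ([], [])

-- ===== PORT B =====
def check_labels_alt (true_residues : List Int) : List Int × List Int :=
  let full : PySem.Set Int := PySem.Set.ofList (PySem.List.pyRange 0 20 1)
  let present : PySem.Set Int := PySem.Set.ofList true_residues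
  let labels := PySem.List.sorted (PySem.Set.inter full present) (fun x => x)
  let unused_residues := PySem.List.sorted (PySem.Set.diff full present) (fun x => x)
  (unused_residues, labels)

-- ===== PRECONDITION & SPEC =====
def Spec_check_labels (true_residues : List Int) (out : List Int × List Int) : Prop := out = check_labels_alt true_residues
instance (true_residues : List Int) (out : List Int × List Int) : Decidable (Spec_check_labels true_residues out) := by unfold Spec_check_labels; infer_instance

-- ===== CLAIM (what is proved, stated in full; the proofs are below) =====
def Claim_equal_check_labels : Prop := ∀ (true_residues : List Int), Dom_check_labels true_residues → Spec_check_labels true_residues (check_labels true_residues)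

-- ===== LEMMAS AND PROOFS =====

-- A's loop with two appended accumulators splits the key list by the membership predicate.
theorem check_labels_loop (tr : List Int) (keys : List Int) (u l : List Int) :
    keys.foldl
      (fun st key =>
        if key ∉ tr then (st.1 ++ [key], st.2) else (st.1, st.2 ++ [key]))
      (u, l)
    = (u ++ keys.filter (fun k => !decide (k ∈ tr)), l ++ keys.filter (fun k => decide (k ∈ tr))) := by
  induction keys generalizing u l with
  | nil => simp
  | cons k ks ih =>
    by_cases h : k ∈ tr
    · rw [List.foldl_cons, if_neg (not_not_intro h), ih]
      simp [h]
    · rw [List.foldl_cons, if_pos h, ih]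
      simp [h]

-- B's sorted set difference / intersection with [0..19] is the filter of [0..19] by (non-)membership.
theorem sorted_diff_eq (tr : List Int) :
    PySem.List.sorted
        (PySem.Set.diff (PySem.Set.ofList (PySem.List.pyRange 0 20 1)) (PySem.Set.ofList tr))
        (fun x => x)
      = (PySem.List.pyRange 0 20 1).filter (fun k => !decide (k ∈ tr)) := by
  apply PySem.List.sorted_eq_of_perm_of_pairwise_lt
  · apply (List.perm_ext_iff_of_nodup ?_ ?_).mpr
    · intro a
      simp [PySem.Set.mem_diff, PySem.Set.mem_ofList, List.mem_filter]
    · exact (List.Nodup.filter _ (by decide))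
    · exact PySem.Set.nodup_diff _ _ (PySem.Set.nodup_ofList _)
  · exact List.Pairwise.sublist List.filter_sublist (by decide)

theorem sorted_inter_eq (tr : List Int) :
    PySem.List.sorted
        (PySem.Set.inter (PySem.Set.ofList (PySem.List.pyRange 0 20 1)) (PySem.Set.ofList tr))
        (fun x => x)
      = (PySem.List.pyRange 0 20 1).filter (fun k => decide (k ∈ tr)) := by
  apply PySem.List.sorted_eq_of_perm_of_pairwise_lt
  · apply (List.perm_ext_iff_of_nodup ?_ ?_).mpr
    · intro a
      simp [PySem.Set.mem_inter, PySem.Set.mem_ofList, List.mem_filter]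
    · exact (List.Nodup.filter _ (by decide))
    · exact PySem.Set.nodup_inter _ _ (PySem.Set.nodup_ofList _)
  · exact List.Pairwise.sublist List.filter_sublist (by decide)

-- ===== VERDICT (by name: the statement is the Claim_ definition above) =====
theorem check_labels_spec : Claim_equal_check_labels := by
  intro tr _
  unfold Spec_check_labels check_labels
  rw [check_labels_loop]
  dsimp only [check_labels_alt]
  rw [sorted_diff_eq, sorted_inter_eq]
  simp
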